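-- pv_equiv track=rewrite | github.com/hayeonkimmie/Programmers | jieun/programmers/basic/230626.py | solution
-- ===== SOURCE A (Python) =====
-- def solution(myString):
--     answer = ''
--     for i in myString:
--         if ord(i) < ord('l'):
--             answer += 'l'
--         else:
--             answer += i
--     return answer
-- ===== SOURCE B (Python) =====
-- def solution(myString):
--     # Run-length scan: consume maximal runs of low (< 'l') / high chars with a
--     # two-pointer loop; emit 'l'*runlen for low runs, the slice itself for high runs.
--     n = len(myString)
--     parts = []
--     i = 0
--     while i < n:
--         j = i
--         if myString[i] < 'l':
--             while j < n and myString[j] < 'l':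
--                 j += 1
--             parts.append('l' * (j - i))
--         else:
--             while j < n and myString[j] >= 'l':
--                 j += 1
--             parts.append(myString[i:j])
--         i = j
--     return ''.join(parts)
-- ===== Notes on version B (the rewrite author's own statement) =====
-- stated objective: alternative
-- what changed: Replaces the per-character branch-and-append loop with a two-pointer run-length scan that consumes maximal runs of low/high characters and emits 'l'*runlen or the untouched slice per run, joined at the end.
import Mathlib
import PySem

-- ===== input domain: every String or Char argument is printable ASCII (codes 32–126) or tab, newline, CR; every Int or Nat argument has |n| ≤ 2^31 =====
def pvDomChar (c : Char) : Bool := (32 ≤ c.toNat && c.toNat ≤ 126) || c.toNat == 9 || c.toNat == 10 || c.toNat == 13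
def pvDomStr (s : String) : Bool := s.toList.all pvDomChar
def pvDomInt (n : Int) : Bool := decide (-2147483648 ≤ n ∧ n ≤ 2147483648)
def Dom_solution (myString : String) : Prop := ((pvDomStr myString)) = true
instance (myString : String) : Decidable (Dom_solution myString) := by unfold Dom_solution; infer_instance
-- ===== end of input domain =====

-- B replaces A's per-character branch-and-append loop with a two-pointer run-length
-- scan emitting whole runs ('l'*len for low runs, the slice itself for high runs).


-- ===== PORT A =====
-- literal loop: answer = ''; for i in myString: answer += 'l' if ord(i) < ord('l') else i
def solution (myString : String) : String :=
  myString.toList.foldl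
    (fun answer i => if i.toNat < 108 then answer ++ "l" else answer ++ String.ofList [i]) ""

-- ===== PORT B =====
-- the run scan: each step consumes one maximal run (inner while = takeWhile/dropWhile)
def pvRuns : List Char → List String
  | [] => []
  | c :: rest =>
    if h : c.toNat < 108 then
      String.ofList (List.replicate (((c :: rest).takeWhile (fun x => decide (x.toNat < 108))).length) 'l')
        :: pvRuns ((c :: rest).dropWhile (fun x => decide (x.toNat < 108)))
    else
      String.ofList ((c :: rest).takeWhile (fun x => decide (¬ x.toNat < 108)))
        :: pvRuns ((c :: rest).dropWhile (fun x => decide (¬ x.toNat < 108)))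
  termination_by l => l.length
  decreasing_by
  · simp [List.dropWhile, h]
    exact List.length_dropWhile_le _ _
  · simp [List.dropWhile, h]
    exact List.length_dropWhile_le _ _

def solution_alt (myString : String) : String :=
  String.join (pvRuns myString.toList)

-- ===== PRECONDITION & SPEC =====
def Spec_solution (myString : String) (out : String) : Prop := out = solution_alt myString
instance (myString : String) (out : String) : Decidable (Spec_solution myString out) := by unfold Spec_solution; infer_instance

-- ===== CLAIM (what is proved, stated in full; the proofs are below) =====
def Claim_equal_solution : Prop := ∀ (myString : String), Dom_solution myString → Spec_solution myString (solution myString)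

-- ===== LEMMAS AND PROOFS =====

theorem foldl_append_str (xs : List String) (s : String) :
    xs.foldl (fun r t => r ++ t) s = s ++ xs.foldl (fun r t => r ++ t) "" := by
  induction xs generalizing s with
  | nil => simp
  | cons x t ih =>
    simp only [List.foldl_cons]
    rw [ih (s ++ x), ih ("" ++ x)]
    simp [String.append_assoc]

theorem join_cons (s : String) (l : List String) :
    String.join (s :: l) = s ++ String.join l := by
  simp only [String.join, List.foldl_cons]
  rw [foldl_append_str]
  rfl

theorem ofList_cons (a : Char) (l : List Char) :
    String.ofList (a :: l) = String.ofList [a] ++ String.ofList l := by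
  have h : String.ofList ([a] ++ l) = String.ofList [a] ++ String.ofList l :=
    String.ofList_append
  simpa using h

-- A's step function
def pvStep (answer : String) (i : Char) : String :=
  if i.toNat < 108 then answer ++ "l" else answer ++ String.ofList [i]

theorem foldl_low (t : List Char) (acc : String) (ht : ∀ x ∈ t, x.toNat < 108) :
    t.foldl pvStep acc = acc ++ String.ofList (List.replicate t.length 'l') := by
  induction t generalizing acc with
  | nil => simp
  | cons x xs ih =>
    have hx : x.toNat < 108 := ht x (by simp)
    simp only [List.foldl_cons, pvStep, if_pos hx, List.length_cons,
      List.replicate_succ]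
    rw [ih _ (fun y hy => ht y (by simp [hy]))]
    rw [ofList_cons]
    simp [String.append_assoc]

theorem foldl_high (t : List Char) (acc : String) (ht : ∀ x ∈ t, ¬ x.toNat < 108) :
    t.foldl pvStep acc = acc ++ String.ofList t := by
  induction t generalizing acc with
  | nil => simp
  | cons x xs ih =>
    have hx : ¬ x.toNat < 108 := ht x (by simp)
    simp only [List.foldl_cons, pvStep, if_neg hx]
    rw [ih _ (fun y hy => ht y (by simp [hy]))]
    simp [String.append_assoc, ← String.ofList_append]

theorem foldl_eq_runs (l : List Char) (acc : String) :
    l.foldl pvStep acc = acc ++ String.join (pvRuns l) := by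
  induction l using pvRuns.induct generalizing acc with
  | case1 => simp [pvRuns, String.join]
  | case2 c rest h ih =>
    rw [pvRuns]
    simp only [dif_pos h, join_cons]
    conv_lhs => rw [← List.takeWhile_append_dropWhile
      (p := fun x => decide (x.toNat < 108)) (l := c :: rest)]
    rw [List.foldl_append, ih, foldl_low _ _ (by
      intro x hx
      have := List.mem_takeWhile_imp hx
      simpa using this)]
    simp [String.append_assoc]
  | case3 c rest h ih =>
    rw [pvRuns]
    simp only [dif_neg h, join_cons]
    conv_lhs => rw [← List.takeWhile_append_dropWhile
      (p := fun x => decide (¬ x.toNat < 108)) (l := c :: rest)]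
    rw [List.foldl_append, ih, foldl_high _ _ (by
      intro x hx
      have := List.mem_takeWhile_imp hx
      simpa using this)]
    simp [String.append_assoc]

-- ===== VERDICT (by name: the statement is the Claim_ definition above) =====
theorem solution_spec : Claim_equal_solution := by
  intro s _
  unfold Spec_solution solution solution_alt
  rw [show (fun answer (i : Char) => if i.toNat < 108 then answer ++ "l" else answer ++ String.ofList [i]) = pvStep from rfl]
  rw [foldl_eq_runs]
  simp
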